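-- pv_equiv track=rewrite | github.com/Matthew-Neba/python-leetcode | useful_problems/4D-DP.py | magicalSum
-- ===== SOURCE A (Python) =====
-- from typing import List
--
-- def magicalSum(m: int, k: int, nums: List[int]) -> int:
--     # Distinct numbers in the sequence are crucial for determinig if k condition is met
--     #
--     # Key to this problem is realizing that we can use DP to retrieve the sum of all the
--     # smaller sequences needed for this sequence and thus, we will just need to multiply those
--     # sums buy the current element we choose to include.
--     #
--     # 4D DP? Keep track of the carry to easily determine our current ones and the carry ones
--     #
--     #
--     MOD = 10**9 + 7
--
--     # compute pascals table for O(1) combinations calculation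
--     C = [[0] * (31) for _ in range(31)]
--     for i in range(31):
--         C[i][0] = C[i][i] = 1
--         for j in range(1,i):
--             C[i][j] = C[i-1][j-1] + C[i-1][j]
--
--     dp = {}
--     def find_products(choice_idx, seq_length, number_ones, carry):
--
--         if (choice_idx, seq_length, number_ones, carry) in dp:
--             return dp[(choice_idx, seq_length, number_ones, carry)]
--
--         if choice_idx == len(nums):
--             if seq_length != 0:
--                 return 0
--
--             # see how many ones the carry would generate, we need it to match the remaining ones
--             if number_ones - bin(carry).count("1") == 0:
--                 return 1
--             else:
--                 return 0
--
--         sum_products = 0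
--         # take (any number of times), accounting for the combinations in the sequences
--         for t in range(seq_length+1):
--             # retrieve the ways to combine
--             comb = C[seq_length][t]
--
--             set_one = (carry + t) % 2
--             new_carry = (carry + t)//2
--
--             sum_products += (comb * pow(nums[choice_idx],t,MOD) *
--             find_products(choice_idx + 1, seq_length - t, number_ones - set_one, new_carry)) % MOD
--
--         dp[(choice_idx, seq_length, number_ones, carry)] = sum_products
--         return dp[(choice_idx, seq_length, number_ones, carry)]
--
--     return find_products(0,m,k,0) % MOD
-- ===== SOURCE B (Python) =====
-- from typing import List
--
-- def magicalSum(m: int, k: int, nums: List[int]) -> int: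
--     # Bottom-up 3D table over (seq_length, ones-offset d, carry) per position,
--     # replacing the memoized 4D recursion; ones is tracked as k - d.
--     MOD = 10**9 + 7
--
--     if m < 0:
--         return 0
--     if not nums:
--         return 1 if (m == 0 and k == 0) else 0
--
--     # Pascal's table, as in the recursive version
--     C = [[0] * 31 for _ in range(31)]
--     for i in range(31):
--         C[i][0] = C[i][i] = 1
--         for j in range(1, i):
--             C[i][j] = C[i - 1][j - 1] + C[i - 1][j]
--
--     n = len(nums)
--     # base layer = states after the last position: 1 iff nothing left to place
--     # and the remaining ones (k - d) are exactly the carry's set bits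
--     layer = [[[1 if s == 0 and (k - d) == bin(c).count("1") else 0
--                for c in range(m + 1)]
--               for d in range(n + 1)]
--              for s in range(m + 1)]
--
--     for i in range(n - 1, -1, -1):
--         x = nums[i]
--         pw = [pow(x, t, MOD) for t in range(m + 1)]
--         layer = [[[sum((C[s][t] * pw[t] *
--                         layer[s - t][d + (c + t) % 2][(c + t) // 2]) % MOD
--                        for t in range(s + 1))
--                    for c in range(m + 1)]
--                   for d in range(i + 1)]
--                  for s in range(m + 1)]
--
--     return layer[m][0][0] % MOD
-- ===== Notes on version B (the rewrite author's own statement) =====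
-- stated objective: alternative
-- what changed: Replaces the memoized top-down 4D recursion by an explicit bottom-up layered 3D DP table over (seq_length, ones-offset, carry), iterating positions from last to first; the number of ones is tracked as an offset d with ones = k - d, and per-position powers are precomputed.
import Mathlib
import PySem

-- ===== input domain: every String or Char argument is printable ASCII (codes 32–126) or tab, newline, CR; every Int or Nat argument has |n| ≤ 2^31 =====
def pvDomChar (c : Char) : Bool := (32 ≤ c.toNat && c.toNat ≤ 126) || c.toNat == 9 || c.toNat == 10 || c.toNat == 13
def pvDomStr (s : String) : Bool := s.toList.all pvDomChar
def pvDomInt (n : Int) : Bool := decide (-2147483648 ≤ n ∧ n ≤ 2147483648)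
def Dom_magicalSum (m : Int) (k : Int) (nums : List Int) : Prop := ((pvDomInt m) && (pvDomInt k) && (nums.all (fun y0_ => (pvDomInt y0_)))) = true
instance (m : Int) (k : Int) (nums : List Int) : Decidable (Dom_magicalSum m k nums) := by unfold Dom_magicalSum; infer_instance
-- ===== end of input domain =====

-- B replaces A's memoized top-down 4D recursion by an explicit bottom-up layered
-- 3D table (same Pascal table and modular arithmetic); objective: alternative
-- decomposition, not speed.

-- ===== PORT A =====
-- Pascal's table `C` (identical loop code in Source A and Source B, so shared by both ports)
def pascalC : List (List Int) :=
  (List.range 31).foldl (fun C i =>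
    let C := C.set i ((C.getD i []).set 0 1)
    let C := C.set i ((C.getD i []).set i 1)
    (List.range' 1 (i - 1)).foldl (fun C j =>
      C.set i ((C.getD i []).set j ((C.getD (i - 1) []).getD (j - 1) 0 + (C.getD (i - 1) []).getD j 0))) C)
    (List.replicate 31 (List.replicate 31 0))

-- A's find_products: memoization dropped (pure function, the memo is value-transparent);
-- choice_idx is represented by the remaining suffix of nums.  bin(c).count("1") for the
-- (always nonnegative) carry is PySem.Int.bitCount; C[seq][t] is exact wherever Python
-- does not raise (Pre_ excludes seq = m ≥ 31 with nums nonempty, where Python IndexErrors).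
def findA (C : List (List Int)) (rest : List Int) (seq ones carry : Int) : Int :=
  match rest with
  | [] =>
      if seq ≠ 0 then 0
      else if ones - (PySem.Int.bitCount carry : Int) = 0 then 1 else 0
  | x :: xs =>
      (PySem.List.pyRange 0 (seq + 1) 1).foldl (fun acc t =>
        let comb := ((PySem.List.pyGet? C seq).getD []) |>
          (fun row => (PySem.List.pyGet? row t).getD 0)
        let setOne := PySem.Int.mod (carry + t) 2
        let newCarry := PySem.Int.floordiv (carry + t) 2
        acc + PySem.Int.mod (comb * PySem.Int.powMod x t.toNat 1000000007 *
          findA C xs (seq - t) (ones - setOne) newCarry) 1000000007) 0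

def magicalSum (m : Int) (k : Int) (nums : List Int) : Int :=
  PySem.Int.mod (findA pascalC nums m k 0) 1000000007

-- ===== PORT B =====
-- base layer: states after the last position (Source B's first comprehension)
def altBase (mn n : Nat) (k : Int) : List (List (List Int)) :=
  (List.range (mn + 1)).map fun (s : Nat) =>
    (List.range (n + 1)).map fun (d : Nat) =>
      (List.range (mn + 1)).map fun (c : Nat) =>
        if s = 0 ∧ k - (d : Int) = (PySem.Int.bitCount (c : Int) : Int) then 1 else 0

-- one step of Source B's backward loop (position i, element x)
def altStep (C : List (List Int)) (mn : Nat) (x : Int) (i : Nat)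
    (layer : List (List (List Int))) : List (List (List Int)) :=
  let pw := (List.range (mn + 1)).map fun t => PySem.Int.powMod x t 1000000007
  (List.range (mn + 1)).map fun s =>
    (List.range (i + 1)).map fun d =>
      (List.range (mn + 1)).map fun c =>
        (List.range (s + 1)).foldl (fun acc t =>
          acc + PySem.Int.mod (((C.getD s []).getD t 0) * (pw.getD t 0) *
            (((layer.getD (s - t) []).getD (d + (c + t) % 2) []).getD ((c + t) / 2) 0))
            1000000007) 0

def magicalSum_alt (m : Int) (k : Int) (nums : List Int) : Int :=
  if m < 0 then 0
  else if nums = [] then (if m = 0 ∧ k = 0 then 1 else 0)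
  else
    let n := nums.length
    let mn := m.toNat
    let final := ((List.range n).reverse).foldl
      (fun layer i => altStep pascalC mn (nums.getD i 0) i layer) (altBase mn n k)
    PySem.Int.mod (((final.getD mn []).getD 0 []).getD 0 0) 1000000007

-- ===== PRECONDITION & SPEC =====
-- Pre_ excludes exactly the inputs on which Python A raises: with nums nonempty and
-- m ≥ 31, A's first loop iteration evaluates C[m] and IndexErrors (C is 31×31).
def Pre_magicalSum (m : Int) (k : Int) (nums : List Int) : Prop := nums = [] ∨ m ≤ 30
instance (m : Int) (k : Int) (nums : List Int) : Decidable (Pre_magicalSum m k nums) := by unfold Pre_magicalSum; infer_instance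
def pvWitness_magicalSum : Int × Int × List Int := (3, 1, [2, 3])

def Spec_magicalSum (m : Int) (k : Int) (nums : List Int) (out : Int) : Prop := out = magicalSum_alt m k nums
instance (m : Int) (k : Int) (nums : List Int) (out : Int) : Decidable (Spec_magicalSum m k nums out) := by unfold Spec_magicalSum; infer_instance

-- ===== CLAIM (what is proved, stated in full; the proofs are below) =====
def Claim_equal_magicalSum : Prop := ∀ (m : Int) (k : Int) (nums : List Int), Dom_magicalSum m k nums → Pre_magicalSum m k nums → Spec_magicalSum m k nums (magicalSum m k nums)

-- ===== LEMMAS AND PROOFS =====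

-- the backward fold of Source B, started at position i (i elements still to process below it)
def altFold (k : Int) (nums : List Int) (mn i : Nat) : List (List (List Int)) :=
  ((List.range' i (nums.length - i)).reverse).foldl
    (fun layer j => altStep pascalC mn (nums.getD j 0) j layer) (altBase mn nums.length k)

lemma altFold_len (k : Int) (nums : List Int) (mn : Nat) :
    altFold k nums mn nums.length = altBase mn nums.length k := by
  simp [altFold]

lemma altFold_step (k : Int) (nums : List Int) (mn i : Nat) (hi : i < nums.length) :
    altFold k nums mn i = altStep pascalC mn (nums.getD i 0) i (altFold k nums mn (i + 1)) := by
  unfold altFold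
  rw [show nums.length - i = (nums.length - (i + 1)) + 1 by omega,
      List.range'_succ, List.reverse_cons, List.foldl_append]
  simp

-- the central invariant: entry (s, d, c) of layer i is A's recursion on the suffix from i
lemma altFold_entry (k : Int) (nums : List Int) (mn : Nat) :
    ∀ (j i : Nat), i + j = nums.length → ∀ s, s ≤ mn → ∀ d, d ≤ i → ∀ c, c ≤ mn →
      (((altFold k nums mn i).getD s []).getD d []).getD c 0 =
        findA pascalC (nums.drop i) (s : Int) (k - (d : Int)) (c : Int) := by
  intro j
  induction j with
  | zero =>
      intro i hlen s hs d hd c hc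
      have hi : i = nums.length := by omega
      subst hi
      rw [altFold_len]
      unfold altBase
      rw [PySem.List.getD_map_range _ _ _ _ (by omega),
          PySem.List.getD_map_range _ _ _ _ (by omega),
          PySem.List.getD_map_range _ _ _ _ (by omega),
          List.drop_length]
      unfold findA
      by_cases hs0 : s = 0
      · subst hs0
        simp only [Nat.cast_zero, ne_eq, not_true_eq_false, if_false, true_and]
        by_cases hb : k - (d : Int) = (PySem.Int.bitCount (c : Int) : Int)
        · simp [hb]
        · simp [hb, sub_eq_zero]
      · simp [hs0]
  | succ j ih =>
      intro i hlen s hs d hd c hc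
      have hi : i < nums.length := by omega
      rw [altFold_step k nums mn i hi]
      unfold altStep
      simp only []
      rw [PySem.List.getD_map_range _ _ _ _ (by omega),
          PySem.List.getD_map_range _ _ _ _ (by omega),
          PySem.List.getD_map_range _ _ _ _ (by omega)]
      rw [List.drop_eq_getElem_cons hi]
      unfold findA
      rw [PySem.List.pyRange_one,
          show ((s : Int) + 1 - 0).toNat = s + 1 by omega,
          List.foldl_map]
      apply PySem.List.foldl_congr_mem
      intro acc t ht
      simp only [List.mem_range] at ht
      have htle : t ≤ s := by omega
      simp only [zero_add, PySem.List.pyGet?_natCast,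
        ← List.getD_eq_getElem?_getD, Int.toNat_natCast]
      rw [PySem.List.getD_map_range _ _ _ _ (by omega : t < mn + 1)]
      rw [List.getD_eq_getElem nums 0 hi]
      have hcast1 : (c : Int) + (t : Int) = ((c + t : Nat) : Int) := by push_cast; ring
      have hmod : PySem.Int.mod ((c + t : Nat) : Int) 2 = (((c + t) % 2 : Nat) : Int) := by
        exact_mod_cast PySem.Int.mod_natCast (c + t) 2
      have hdiv : PySem.Int.floordiv ((c + t : Nat) : Int) 2 = (((c + t) / 2 : Nat) : Int) := by
        exact_mod_cast PySem.Int.floordiv_natCast (c + t) 2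
      rw [hcast1, hmod, hdiv]
      have hcast2 : (s : Int) - (t : Int) = ((s - t : Nat) : Int) := by omega
      have hcast3 : k - (d : Int) - ((c + t) % 2 : Nat) = k - ((d + (c + t) % 2 : Nat) : Int) := by
        push_cast; ring
      rw [hcast2, hcast3,
          ih (i + 1) (by omega) (s - t) (by omega) (d + (c + t) % 2)
            (by have := Nat.mod_lt (c + t) (show 0 < 2 by omega); omega)
            ((c + t) / 2) (by omega)]

lemma findA_base (k c : Int) (m : Int) :
    findA pascalC [] m k c =
      if m ≠ 0 then 0 else if k - (PySem.Int.bitCount c : Int) = 0 then 1 else 0 := by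
  rfl

lemma findA_neg (m k : Int) (nums : List Int) (hm : m < 0) :
    findA pascalC nums m k 0 = 0 := by
  cases nums with
  | nil => rw [findA_base]; simp [show m ≠ 0 by omega]
  | cons x xs =>
      unfold findA
      rw [PySem.List.pyRange_one_eq_nil (by omega : m + 1 ≤ 0)]
      rfl

-- the two ports agree on ALL inputs; Pre_ is needed only for Python-faithfulness of port A
theorem magicalSum_spec_aux (m k : Int) (nums : List Int) :
    magicalSum m k nums = magicalSum_alt m k nums := by
  unfold magicalSum magicalSum_alt
  by_cases hm : m < 0
  · rw [if_pos hm, findA_neg m k nums hm]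
    decide
  · rw [if_neg hm]
    by_cases hnil : nums = []
    · subst hnil
      rw [if_pos rfl, findA_base]
      by_cases hm0 : m = 0
      · subst hm0
        simp only [ne_eq, not_true_eq_false, if_false, PySem.Int.bitCount_zero,
          Nat.cast_zero, sub_zero, true_and]
        by_cases hk : k = 0
        · simp [hk]
        · simp [hk]
      · simp [hm0]
    · rw [if_neg hnil]
      have hn : 0 < nums.length := List.length_pos_iff.mpr hnil
      have hfold : ((List.range nums.length).reverse).foldl
          (fun layer i => altStep pascalC m.toNat (nums.getD i 0) i layer)
          (altBase m.toNat nums.length k) = altFold k nums m.toNat 0 := by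
        unfold altFold
        rw [List.range_eq_range']
        simp
      show PySem.Int.mod (findA pascalC nums m k 0) 1000000007 =
        PySem.Int.mod ((((((List.range nums.length).reverse).foldl
            (fun layer i => altStep pascalC m.toNat (nums.getD i 0) i layer)
            (altBase m.toNat nums.length k)).getD m.toNat []).getD 0 []).getD 0 0)
          1000000007
      rw [hfold,
          altFold_entry k nums m.toNat nums.length 0 (by omega) m.toNat le_rfl
            0 (Nat.zero_le _) 0 (Nat.zero_le _)]
      simp only [List.drop_zero, Nat.cast_zero, sub_zero]
      rw [Int.toNat_of_nonneg (by omega)]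

-- ===== VERDICT (by name: the statement is the Claim_ definition above) =====
theorem magicalSum_spec : Claim_equal_magicalSum := by
  intro m k nums _ _
  exact magicalSum_spec_aux m k nums
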